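-- pv_equiv track=rewrite | github.com/charliedmiller/coding_challenges | boring_numbers.py | boring_numbers_upto
-- ===== SOURCE A (Python) =====
-- def boring_numbers_upto(num):
--     count = 0
--     num_str = str(num)
--     digits = len(str(num))
--
--     #add up boring numbers found in all digits leading up to
--     # number of digits number actually has
--     #this can be in a formula, but max digits is 19, so this is acceptable
--     for digit in range(1,digits):
--         count += 5**digit
--
--     #swich between expecting odd or not odd
--     expecting_odd = True
--     for digit_idx in range(0,digits):
--         #examine digits left to right, determine their value
--         digit_val = int(num_str[digit_idx])
--
--         #determine how many borings are found per 100, 1000 etc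
--         #number of zeros based off current digit
--         exp = digits - digit_idx - 1
--         borings_per = 5**exp
--
--         #how many we add goes according to if we're expecting an odd here,
--         #if this is the first digit in the number,
--         #and what the value of the digit is
--         if expecting_odd:
--             #how many to add if odd
--             count += borings_per * (digit_val//2)
--         elif digit_idx == 0:
--             #how many to add if even and it's the first digit
--             count += borings_per * ((digit_val-1)//2)
--         else:
--             #how many to add if even and it's not the first digit
--             count += borings_per * ((digit_val+1)//2)
--
--         #if this digit was the wrong digit for boring, we stop here
--         digit_odd = digit_val % 2 != 0
--         if digit_odd != expecting_odd:
--             break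
--
--         #if this is the last digit, add it to the total
--         if digit_idx == (digits-1):
--             count += 1
--
--         #switch to the opposite according to the problem
--         expecting_odd = not expecting_odd
--
--     return count
-- ===== SOURCE B (Python) =====
-- def boring_numbers_upto(num):
--     ds = [int(c) for c in str(num)]
--     L = len(ds)
--     # numbers with fewer digits than num: closed form for 5 + 25 + ... + 5**(L-1)
--     total = (5 ** L - 5) // 4
--     # right-to-left fold over the digits with a running power of 5:
--     # acc = count of boring completions for the processed suffix
--     acc = 1
--     pow5 = 1
--     for j, d in enumerate(reversed(ds)):
--         expect_odd = (L - 1 - j) % 2 == 0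
--         below = d // 2 if expect_odd else (d + 1) // 2
--         acc = pow5 * below + (acc if d % 2 == (1 if expect_odd else 0) else 0)
--         pow5 *= 5
--     return total + acc
-- ===== Notes on version B (the rewrite author's own statement) =====
-- stated objective: alternative
-- what changed: B replaces A's geometric-sum loop by its closed form and A's indexed left-to-right loop (with break and a fresh exponentiation per step) by a single right-to-left fold over the digit list that carries a running power of five and accumulates the count of boring completions of the processed suffix.
import Mathlib
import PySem

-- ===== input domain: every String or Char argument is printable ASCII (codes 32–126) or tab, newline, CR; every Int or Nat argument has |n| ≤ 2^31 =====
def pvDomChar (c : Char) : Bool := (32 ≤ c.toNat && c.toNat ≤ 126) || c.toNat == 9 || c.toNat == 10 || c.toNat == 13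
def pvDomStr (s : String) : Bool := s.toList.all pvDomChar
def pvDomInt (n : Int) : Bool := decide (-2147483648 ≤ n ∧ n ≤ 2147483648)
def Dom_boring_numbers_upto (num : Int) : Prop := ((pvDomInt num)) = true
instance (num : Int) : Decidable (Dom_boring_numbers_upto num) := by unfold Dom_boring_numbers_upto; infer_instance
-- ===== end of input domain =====

-- B replaces A's geometric-sum loop by its closed form and A's indexed left-to-right
-- loop (with break and per-step exponentiation) by a single right-to-left fold over the
-- digits carrying a running power of 5; objective: alternative (same cost, different traversal).

-- ===== PORT A =====
-- the loop 'for digit_idx in range(0, digits): … break …' of A, with early return on break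
def pvA_loop (num_str : String) (digits : Int) : List Int → Int → Bool → Int
  | [], count, _ => count
  | digit_idx :: rest, count, expecting_odd =>
    -- digit_val = int(num_str[digit_idx]); the getD default is unreachable under Pre_ (nonnegative num)
    let digit_val : Int :=
      ((PySem.Str.pyGet? num_str digit_idx).bind
        (fun c => PySem.Int.ofStr? (String.mk [c]))).getD 0
    let exp : Int := digits - digit_idx - 1
    let borings_per : Int := 5 ^ exp.toNat   -- 5**exp, exponent nonneg here
    let count :=
      if expecting_odd then count + borings_per * (PySem.Int.floordiv digit_val 2)
      else if digit_idx == 0 then count + borings_per * (PySem.Int.floordiv (digit_val - 1) 2)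
      else count + borings_per * (PySem.Int.floordiv (digit_val + 1) 2)
    let digit_odd : Bool := PySem.Int.mod digit_val 2 != 0
    if digit_odd != expecting_odd then count
    else
      let count := if digit_idx == digits - 1 then count + 1 else count
      pvA_loop num_str digits rest count (!expecting_odd)

def boring_numbers_upto (num : Int) : Int :=
  let num_str := PySem.Int.toStr num
  let digits : Int := PySem.Str.len (PySem.Int.toStr num)
  let count : Int :=
    (PySem.List.pyRange 1 digits 1).foldl (fun c d => c + 5 ^ d.toNat) 0
  pvA_loop num_str digits (PySem.List.pyRange 0 digits 1) count true

-- ===== PORT B =====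
def boring_numbers_upto_alt (num : Int) : Int :=
  -- ds = [int(c) for c in str(num)]; the getD default is unreachable under Pre_ (nonnegative num)
  let ds : List Int :=
    (PySem.Int.toChars num).map (fun c => (PySem.Int.ofStr? (String.mk [c])).getD 0)
  let L : Int := ds.length
  let total : Int := PySem.Int.floordiv (5 ^ L.toNat - 5) 4
  let r :=
    (PySem.List.enumerate ds.reverse).foldl
      (fun (s : Int × Int) (p : Int × Int) =>
        match s, p with
        | (acc, pow5), (j, d) =>
          let expect_odd : Bool := PySem.Int.mod (L - 1 - j) 2 == 0
          let below : Int :=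
            if expect_odd then PySem.Int.floordiv d 2 else PySem.Int.floordiv (d + 1) 2
          (pow5 * below +
             (if PySem.Int.mod d 2 == (if expect_odd then 1 else 0) then acc else 0),
           pow5 * 5))
      (1, 1)
  total + r.1

-- ===== PRECONDITION & SPEC =====
-- Pre_ excludes negative num, on which Python A raises ValueError (int of the sign character); B raises there too.
def Pre_boring_numbers_upto (num : Int) : Prop := 0 ≤ num
instance (num : Int) : Decidable (Pre_boring_numbers_upto num) := by
  unfold Pre_boring_numbers_upto; infer_instance
def pvWitness_boring_numbers_upto : Int := 38

def Spec_boring_numbers_upto (num : Int) (out : Int) : Prop := out = boring_numbers_upto_alt num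
instance (num : Int) (out : Int) : Decidable (Spec_boring_numbers_upto num out) := by unfold Spec_boring_numbers_upto; infer_instance

-- ===== CLAIM (what is proved, stated in full; the proofs are below) =====
def Claim_equal_boring_numbers_upto : Prop := ∀ (num : Int), Dom_boring_numbers_upto num → Pre_boring_numbers_upto num → Spec_boring_numbers_upto num (boring_numbers_upto num)

-- ===== LEMMAS AND PROOFS =====

-- digit value both ports extract from a character
def pvDV (c : Char) : Int := (PySem.Int.ofStr? (String.mk [c])).getD 0

-- common mathematical recursion: count of boring completions of a digit suffix
def pvC : List Int → Bool → Int
  | [], _ => 1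
  | d :: t, exp =>
    let below := if exp then PySem.Int.floordiv d 2 else PySem.Int.floordiv (d + 1) 2
    5 ^ t.length * below +
      (if (PySem.Int.mod d 2 != 0) == exp then pvC t (!exp) else 0)


lemma pvPrefix_eq (n : Nat) (h : 1 ≤ n) :
    (PySem.List.pyRange 1 (n : Int) 1).foldl (fun c d => c + 5 ^ d.toNat) 0
    = PySem.Int.floordiv (5 ^ n - 5) 4 := by
  induction n, h using Nat.le_induction with
  | base => decide
  | succ n hn ih =>
    have hdvd : (4 : Int) ∣ 5 ^ n - 5 := by
      have h5 : (5 : Int) ^ n ≡ 1 ^ n [ZMOD 4] := Int.ModEq.pow n (by decide)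
      have hd := Int.ModEq.dvd h5
      simp at hd
      omega
    obtain ⟨c, hc⟩ := hdvd
    have hstep : PySem.List.pyRange 1 ((n : Int) + 1) 1
        = PySem.List.pyRange 1 (n : Int) 1 ++ [(n : Int)] :=
      PySem.List.pyRange_one_succ_right (by exact_mod_cast hn)
    have hcast : ((n : Int) + 1) = ((n + 1 : Nat) : Int) := by push_cast; ring
    rw [← hcast, hstep, List.foldl_append, ih]
    have e1 : PySem.Int.floordiv (5 ^ n - 5) 4 = c := by
      rw [PySem.Int.floordiv_eq_ediv_of_pos (by norm_num), hc]
      omega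
    have e2 : PySem.Int.floordiv (5 ^ (n + 1) - 5) 4 = 5 * c + 5 := by
      rw [PySem.Int.floordiv_eq_ediv_of_pos (by norm_num)]
      have : (5 : Int) ^ (n + 1) - 5 = 4 * (5 * c + 5) := by
        rw [pow_succ]; nlinarith [hc]
      rw [this]; omega
    rw [e1, e2]
    simp [List.foldl]
    nlinarith [hc]

lemma pvFlip (x : Int) : (PySem.Int.mod (x + 1) 2 == 0) = !(PySem.Int.mod x 2 == 0) := by
  rw [PySem.Int.mod_eq_emod_of_pos (by norm_num), PySem.Int.mod_eq_emod_of_pos (by norm_num)]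
  by_cases h : x % 2 = 0
  · have h1 : (x + 1) % 2 = 1 := by omega
    simp [h, h1]
  · have h2 : x % 2 = 1 := by omega
    have h1 : (x + 1) % 2 = 0 := by omega
    simp [h2, h1]

lemma pvCond (e : Bool) (d : Int) :
    (PySem.Int.mod d 2 == (if e then 1 else 0)) = ((PySem.Int.mod d 2 != 0) == e) := by
  rw [PySem.Int.mod_eq_emod_of_pos (by norm_num)]
  by_cases h : d % 2 = 0
  · cases e <;> simp [h]
  · have h2 : d % 2 = 1 := by omega
    cases e <;> simp [h2]

lemma pvB_fold_eq (L : Int) (t : List Int) :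
    ((PySem.List.enumerate t.reverse).foldl
      (fun (s : Int × Int) (p : Int × Int) =>
        match s, p with
        | (acc, pow5), (j, d) =>
          let expect_odd : Bool := PySem.Int.mod (L - 1 - j) 2 == 0
          let below : Int :=
            if expect_odd then PySem.Int.floordiv d 2 else PySem.Int.floordiv (d + 1) 2
          (pow5 * below +
             (if PySem.Int.mod d 2 == (if expect_odd then 1 else 0) then acc else 0),
           pow5 * 5))
      (1, 1))
    = (pvC t (PySem.Int.mod (L - (t.length : Int)) 2 == 0), 5 ^ t.length) := by
  induction t with
  | nil => simp [pvC, PySem.List.enumerate_nil]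
  | cons d t ih =>
    rw [List.reverse_cons, PySem.List.enumerate_append, List.foldl_append, ih]
    simp only [PySem.List.enumerate_cons, PySem.List.enumerate_nil, List.length_reverse,
      List.foldl_cons, List.foldl_nil, List.length_cons]
    have hexp : (PySem.Int.mod (L - 1 - (0 + (t.length : Int))) 2 == 0)
        = (PySem.Int.mod (L - ((t.length + 1 : Nat) : Int)) 2 == 0) := by
      push_cast; ring_nf
    have hflip : (PySem.Int.mod (L - (t.length : Int)) 2 == 0)
        = !(PySem.Int.mod (L - 1 - (0 + (t.length : Int))) 2 == 0) := by
      have harg : L - (t.length : Int) = L - 1 - (0 + (t.length : Int)) + 1 := by ring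
      rw [harg, pvFlip]
    simp only [pvC, hexp.symm, hflip, pvCond, Prod.mk.injEq]
    constructor
    · trivial
    · ring

lemma pvA_loop_eq (s : String) (k i : Nat) (c : Int) (exp : Bool)
    (hk : s.toList.length - i = k)
    (h0 : i = 0 → exp = true) (hi : i < s.toList.length) :
    pvA_loop s (s.toList.length : Int)
      (PySem.List.pyRange (i : Int) (s.toList.length : Int) 1) c exp
    = c + pvC ((s.toList.drop i).map pvDV) exp := by
  induction k generalizing i c exp with
  | zero => omega
  | succ k ih =>
    set cs := s.toList with hcs
    set n := cs.length with hn
    have hcons : PySem.List.pyRange (i : Int) (n : Int) 1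
        = (i : Int) :: PySem.List.pyRange ((i : Int) + 1) (n : Int) 1 :=
      PySem.List.pyRange_one_cons (by exact_mod_cast hi)
    rw [hcons]
    have hget : PySem.Str.pyGet? s (i : Int) = some cs[i] := by
      rw [PySem.Str.pyGet?_natCast]
      simp [← hcs]
    have hdrop : cs.drop i = cs[i] :: cs.drop (i + 1) := List.drop_eq_getElem_cons hi
    have hexp : ((n : Int) - (i : Int) - 1).toNat = (cs.drop (i + 1)).length := by
      rw [List.length_drop]; omega
    -- unfold one step of the loop
    show (let digit_val : Int :=
      ((PySem.Str.pyGet? s (i : Int)).bind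
        (fun c => PySem.Int.ofStr? (String.mk [c]))).getD 0
      let e : Int := (n : Int) - (i : Int) - 1
      let borings_per : Int := 5 ^ e.toNat
      let count :=
        if exp then c + borings_per * (PySem.Int.floordiv digit_val 2)
        else if (i : Int) == 0 then c + borings_per * (PySem.Int.floordiv (digit_val - 1) 2)
        else c + borings_per * (PySem.Int.floordiv (digit_val + 1) 2)
      let digit_odd : Bool := PySem.Int.mod digit_val 2 != 0
      if digit_odd != exp then count
      else
        let count := if (i : Int) == (n : Int) - 1 then count + 1 else count
        pvA_loop s (n : Int) (PySem.List.pyRange ((i : Int) + 1) (n : Int) 1) count (!exp))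
      = c + pvC ((cs.drop i).map pvDV) exp
    rw [hget]
    rw [Option.bind_some]
    have hdv : (PySem.Int.ofStr? (String.mk [cs[i]])).getD 0 = pvDV cs[i] := rfl
    rw [hdv]
    have hRHS : pvC ((cs.drop i).map pvDV) exp
        = 5 ^ (cs.drop (i + 1)).length *
            (if exp then PySem.Int.floordiv (pvDV cs[i]) 2
             else PySem.Int.floordiv (pvDV cs[i] + 1) 2) +
          (if (PySem.Int.mod (pvDV cs[i]) 2 != 0) == exp
           then pvC ((cs.drop (i + 1)).map pvDV) (!exp) else 0) := by
      rw [hdrop, List.map_cons]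
      simp only [pvC, List.length_map]
    rw [hRHS]
    simp only [hexp]
    set d := pvDV cs[i] with hd
    set per : Int := 5 ^ (cs.drop (i + 1)).length with hper
    have hbranch :
        (if exp then c + per * (PySem.Int.floordiv d 2)
         else if (i : Int) == 0 then c + per * (PySem.Int.floordiv (d - 1) 2)
         else c + per * (PySem.Int.floordiv (d + 1) 2))
        = c + per * (if exp then PySem.Int.floordiv d 2
                     else PySem.Int.floordiv (d + 1) 2) := by
      cases exp with
      | true => simp
      | false =>
        have hi0 : i ≠ 0 := fun h => by simpa using h0 h
        have hz : ((i : Int) == 0) = false := by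
          simp; omega
        simp [hz]
    rw [hbranch]
    by_cases hm : ((PySem.Int.mod d 2 != 0) == exp) = true
    · -- matching digit: loop continues
      have hnm : ((PySem.Int.mod d 2 != 0) != exp) = false := by
        simp_all
      rw [hnm, hm]
      simp only [if_false, Bool.false_eq_true, if_true]
      by_cases hlast : i + 1 = n
      · -- last digit
        have hl : ((i : Int) == (n : Int) - 1) = true := by
          simp; omega
        have hnil : PySem.List.pyRange ((i : Int) + 1) (n : Int) 1 = [] :=
          PySem.List.pyRange_one_eq_nil (by omega)
        have hdnil : cs.drop (i + 1) = [] := by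
          rw [List.drop_eq_nil_iff]; omega
        rw [hl, hnil]
        simp only [if_true, pvA_loop]
        rw [hdnil]
        simp [pvC]
        ring
      · have hl : ((i : Int) == (n : Int) - 1) = false := by
          simp; omega
        have hcast : ((i : Int) + 1) = ((i + 1 : Nat) : Int) := by push_cast; ring
        rw [hl, hcast]
        simp only [if_false, Bool.false_eq_true]
        rw [ih (i + 1) _ (!exp) (by omega) (by omega) (by omega)]
        ring
    · have hnm : ((PySem.Int.mod d 2 != 0) != exp) = true := by
        simp_all
      have hmf : ((PySem.Int.mod d 2 != 0) == exp) = false := by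
        simpa using hm
      rw [hnm, hmf]
      simp

-- ===== VERDICT (by name: the statement is the Claim_ definition above) =====
theorem boring_numbers_upto_spec : Claim_equal_boring_numbers_upto := by
  intro num _ _
  unfold Spec_boring_numbers_upto boring_numbers_upto boring_numbers_upto_alt
  rw [← PySem.Int.toList_toStr]
  have hmap : (fun c => (PySem.Int.ofStr? (String.mk [c])).getD 0) = pvDV := rfl
  rw [hmap]
  set s := PySem.Int.toStr num with hs
  simp only [PySem.Str.len_eq, List.length_map]
  cases hcase : s.toList with
  | nil =>
    simp only [List.length_nil, List.map_nil, List.reverse_nil, PySem.List.enumerate_nil,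
      List.foldl_nil, Nat.cast_zero]
    rw [PySem.List.pyRange_one_eq_nil (by norm_num), PySem.List.pyRange_one_eq_nil (by norm_num)]
    simp [pvA_loop]
  | cons ch tl =>
    have hn1 : 1 ≤ (ch :: tl).length := by simp
    rw [pvB_fold_eq (((ch :: tl).length : Int)) ((ch :: tl).map pvDV)]
    have hA := pvA_loop_eq s (ch :: tl).length 0
      ((PySem.List.pyRange 1 ((s.toList.length : Int)) 1).foldl (fun c d => c + 5 ^ d.toNat) 0)
      true (by simp [hcase]) (fun _ => rfl) (by simp [hcase])
    rw [hcase] at hA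
    simp only [Nat.cast_zero, List.drop_zero] at hA
    rw [hA]
    simp only [List.length_map]
    have he0 : (PySem.Int.mod ((((ch :: tl).length : Nat) : Int) - (((ch :: tl).length : Nat) : Int)) 2 == 0) = true := by
      simp [PySem.Int.mod_eq_emod_of_pos]
    rw [he0]
    have hton : ((((ch :: tl).length : Nat) : Int)).toNat = (ch :: tl).length := by omega
    rw [hton, pvPrefix_eq _ hn1]
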